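-- pv_equiv track=rewrite | github.com/clinicalml/ContextualAutocomplete_MLHC2020 | hpi_utils/hpi_extraction_utils.py | negation_detection
-- ===== SOURCE A (Python) =====
-- fullstops = ['.', '-', ';']
--
-- midstops = ['+', 'but', 'and', 'pt', '.', ';', 'except', 'reports', 'alert', 'complains', 'has', 'states', 'secondary', 'per', 'did', 'aox3']
--
-- negwords = ['no', 'not', 'denies', 'without', 'non']
--
-- def negation_detection(words):
--     flag = 0
--     res = []
--     for i, w in enumerate(words):
--         neg_start_condition = (flag == 1)
--         neg_stop_condition =  (w in fullstops + midstops + negwords) or (i > 0 and words[i-1][-1] in fullstops)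
--         neg_end_of_list = (i==(len(words)-1) )
--         if neg_start_condition and neg_stop_condition:
--             flag = 0
--             res += [(start_index, i-1)]
--         elif neg_start_condition and neg_end_of_list:
--             flag = 0
--             res += [(start_index, i)]
--         if w in negwords:
--             flag = 1
--             start_index = i
--     return res
-- ===== SOURCE B (Python) =====
-- fullstops = ['.', '-', ';']
--
-- midstops = ['+', 'but', 'and', 'pt', '.', ';', 'except', 'reports', 'alert', 'complains', 'has', 'states', 'secondary', 'per', 'did', 'aox3']
--
-- negwords = ['no', 'not', 'denies', 'without', 'non']
--
-- def negation_detection(words):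
--     stoplist = fullstops + midstops + negwords
--     n = len(words)
--     is_stop = [words[i] in stoplist or (i > 0 and words[i - 1][-1] in fullstops)
--                for i in range(n)]
--     neg_idx = [i for i in range(n) if words[i] in negwords]
--     res = []
--     for s in neg_idx:
--         j = next((j for j in range(s + 1, n) if is_stop[j]), None)
--         if j is not None:
--             res.append((s, j - 1))
--         elif s < n - 1:
--             res.append((s, n - 1))
--     return res
-- ===== Notes on version B (the rewrite author's own statement) =====
-- stated objective: alternative
-- what changed: Replaces the single stateful flag/start_index tracking pass with a two-phase decomposition: precompute a boolean is_stop array and the negword anchor indices, then extend each anchor forward to its first stop (or end of list).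
import Mathlib
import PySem

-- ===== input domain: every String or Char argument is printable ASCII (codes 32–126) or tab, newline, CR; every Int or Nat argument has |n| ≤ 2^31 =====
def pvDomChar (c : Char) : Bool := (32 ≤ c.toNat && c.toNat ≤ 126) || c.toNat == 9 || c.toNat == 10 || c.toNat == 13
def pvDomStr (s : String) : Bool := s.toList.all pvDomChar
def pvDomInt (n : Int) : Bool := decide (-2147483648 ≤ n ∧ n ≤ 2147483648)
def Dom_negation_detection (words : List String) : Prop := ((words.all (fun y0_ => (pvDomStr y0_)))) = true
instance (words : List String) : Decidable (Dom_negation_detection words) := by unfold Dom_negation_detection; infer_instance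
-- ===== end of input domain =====

-- B replaces A's single stateful flag-tracking pass by a two-phase decomposition
-- (precomputed is_stop array + forward scan from each negword anchor); objective: alternative.


-- ===== PORT A =====
def pvFullstops : List String := [".", "-", ";"]
def pvMidstops : List String := ["+", "but", "and", "pt", ".", ";", "except", "reports", "alert", "complains", "has", "states", "secondary", "per", "did", "aox3"]
def pvNegwords : List String := ["no", "not", "denies", "without", "non"]

-- words[i-1][-1] in fullstops; 'none' is Python's IndexError (empty string), excluded by Pre_
def pvLastInFullstops (s : String) : Bool :=
  match PySem.Str.pyGet? s (-1) with
  | some c => decide (c ∈ ['.', '-', ';'])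
  | none => false

-- (w in fullstops + midstops + negwords) or (i > 0 and words[i-1][-1] in fullstops)
def pvStopCond (words : List String) (i : Nat) (w : String) : Bool :=
  decide (w ∈ pvFullstops ++ pvMidstops ++ pvNegwords) ||
  (decide (0 < i) && pvLastInFullstops (words.getD (i - 1) ""))

-- the for-loop of A: state (flag, start_index, res), index counter i
def negLoopA (words : List String) (n : Nat) : List String → Nat → Bool → Nat → List (Int × Int) → List (Int × Int)
  | [], _, _, _, res => res
  | w :: rest, i, flag, start, res =>
    let stopC := pvStopCond words i w
    let endC := decide (i = n - 1)
    let p : Bool × List (Int × Int) :=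
      if flag && stopC then (false, res ++ [((start : Int), (i : Int) - 1)])
      else if flag && endC then (false, res ++ [((start : Int), (i : Int))])
      else (flag, res)
    if w ∈ pvNegwords then negLoopA words n rest (i + 1) true i p.2
    else negLoopA words n rest (i + 1) p.1 start p.2

def negation_detection (words : List String) : List (Int × Int) :=
  negLoopA words words.length words 0 false 0 []

-- ===== PORT B =====
def negation_detection_alt (words : List String) : List (Int × Int) :=
  let n := words.length
  let isStop := (List.range n).map (fun i => pvStopCond words i (words.getD i ""))
  let negIdx := (List.range n).filter (fun i => decide (words.getD i "" ∈ pvNegwords))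
  negIdx.flatMap (fun s =>
    match (List.range' (s + 1) (n - (s + 1))).find? (fun j => isStop.getD j false) with
    | some j => [((s : Int), (j : Int) - 1)]
    | none => if s < n - 1 then [((s : Int), (n : Int) - 1)] else [])

-- ===== PRECONDITION & SPEC =====
-- Pre_ excludes exactly the inputs where Python A raises IndexError: some token words[i-1]
-- is the empty string while words[i] does not short-circuit the stop condition.
def Pre_negation_detection (words : List String) : Prop :=
  ∀ i ∈ List.range words.length, 0 < i →
    words.getD i "" ∈ pvFullstops ++ pvMidstops ++ pvNegwords ∨ words.getD (i - 1) "" ≠ ""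
instance (words : List String) : Decidable (Pre_negation_detection words) := by unfold Pre_negation_detection; infer_instance

def pvWitness_negation_detection : List String := ["denies", "pain", ".", "no", "fever"]

def Spec_negation_detection (words : List String) (out : List (Int × Int)) : Prop := out = negation_detection_alt words
instance (words : List String) (out : List (Int × Int)) : Decidable (Spec_negation_detection words out) := by unfold Spec_negation_detection; infer_instance

-- ===== CLAIM (what is proved, stated in full; the proofs are below) =====
def Claim_equal_negation_detection : Prop := ∀ (words : List String), Dom_negation_detection words → Pre_negation_detection words → Spec_negation_detection words (negation_detection words)

-- ===== LEMMAS AND PROOFS =====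

-- stop / negword condition at position i (token read back from words)
def pvStopAt (words : List String) (i : Nat) : Bool := pvStopCond words i (words.getD i "")
def pvNegAt (words : List String) (i : Nat) : Bool := decide (words.getD i "" ∈ pvNegwords)

-- common semantic middle form: scan from i with an optional pending open negation
def pvS (words : List String) (i : Nat) (pending : Option Nat) : List (Int × Int) :=
  if h : i < words.length then
    (match pending with
      | some s =>
        if pvStopAt words i then [((s : Int), (i : Int) - 1)]
        else if i = words.length - 1 then [((s : Int), (i : Int))] else []
      | none => ([] : List (Int × Int))) ++
    pvS words (i + 1)
      (if pvNegAt words i then some i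
       else if pvStopAt words i || i = words.length - 1 then none else pending)
  else []
  termination_by words.length - i

-- close a pending span started at s, scanning stops from position i on
def pvE (words : List String) (s i : Nat) : List (Int × Int) :=
  match (List.range' i (words.length - i)).find? (fun j => pvStopAt words j) with
  | some j => [((s : Int), (j : Int) - 1)]
  | none => if i < words.length then [((s : Int), ((words.length : Int) - 1))] else []

def pvNegsFrom (words : List String) (i : Nat) : List Nat :=
  (List.range' i (words.length - i)).filter (fun k => pvNegAt words k)

def pvClose (words : List String) (pending : Option Nat) (i : Nat) : List (Int × Int) :=
  match pending with
  | some s => pvE words s i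
  | none => []

theorem pvNeg_stop (words : List String) (i : Nat) (h : pvNegAt words i = true) :
    pvStopAt words i = true := by
  unfold pvNegAt at h
  unfold pvStopAt pvStopCond
  simp only [Bool.or_eq_true, decide_eq_true_eq]
  exact Or.inl (List.mem_append.2 (Or.inr (by simpa using h)))

theorem pv_range'_cons {i n : Nat} (h : i < n) :
    List.range' i (n - i) = i :: List.range' (i + 1) (n - (i + 1)) := by
  have he : n - i = (n - (i + 1)) + 1 := by omega
  rw [he, List.range'_succ]

theorem pvE_stop (words : List String) (s i : Nat) (hi : i < words.length)
    (hst : pvStopAt words i = true) :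
    pvE words s i = [((s : Int), (i : Int) - 1)] := by
  unfold pvE
  rw [pv_range'_cons hi, List.find?_cons_of_pos hst]

theorem pvE_skip (words : List String) (s i : Nat) (hi : i + 1 < words.length)
    (hst : pvStopAt words i = false) :
    pvE words s i = pvE words s (i + 1) := by
  unfold pvE
  rw [pv_range'_cons (by omega), List.find?_cons_of_neg (by simp [hst])]
  cases hf : (List.range' (i + 1) (words.length - (i + 1))).find? (fun j => pvStopAt words j) with
  | some j => rfl
  | none => simp [hi, Nat.lt_of_succ_lt hi]

theorem pvE_last (words : List String) (s i : Nat) (hi : i + 1 = words.length)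
    (hst : pvStopAt words i = false) :
    pvE words s i = [((s : Int), (i : Int))] := by
  unfold pvE
  rw [pv_range'_cons (by omega), List.find?_cons_of_neg (by simp [hst])]
  have h0 : words.length - (i + 1) = 0 := by omega
  rw [h0]
  simp only [List.range'_zero, List.find?_nil]
  have : ((words.length : Int) - 1) = (i : Int) := by omega
  simp [show i < words.length by omega, this]

theorem pvE_off (words : List String) (s i : Nat) (hi : words.length ≤ i) :
    pvE words s i = [] := by
  unfold pvE
  have h0 : words.length - i = 0 := by omega
  rw [h0]
  simp [Nat.not_lt.2 hi]

-- pvS equals the anchor-based form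
theorem lemS (words : List String) :
    ∀ (k i : Nat) (pending : Option Nat), words.length - i ≤ k →
      pvS words i pending =
        pvClose words pending i ++ (pvNegsFrom words i).flatMap (fun s => pvE words s (s + 1)) := by
  intro k
  induction k with
  | zero =>
    intro i pending hk
    have hi : words.length ≤ i := by omega
    rw [pvS.eq_def]
    simp only [dif_neg (by omega : ¬ i < words.length)]
    cases pending with
    | none => simp [pvClose, pvNegsFrom, show words.length - i = 0 by omega]
    | some s => simp [pvClose, pvNegsFrom, pvE_off words s i hi, show words.length - i = 0 by omega]
  | succ k ih =>
    intro i pending hk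
    by_cases hi : i < words.length
    · rw [pvS.eq_def]
      simp only [dif_pos hi]
      have hnegs : pvNegsFrom words i =
          (if pvNegAt words i then [i] else []) ++ pvNegsFrom words (i + 1) := by
        unfold pvNegsFrom
        rw [pv_range'_cons hi, List.filter_cons]
        by_cases hn : pvNegAt words i = true <;> simp [hn]
      by_cases hn : pvNegAt words i = true
      · have hst := pvNeg_stop words i hn
        have hp' : (if pvNegAt words i then some i
            else if pvStopAt words i || i = words.length - 1 then none else pending) = some i := by
          simp [hn]
        rw [hp', ih (i + 1) (some i) (by omega)]
        cases pending with
        | none =>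
          simp [hn, hnegs, pvClose]
        | some s =>
          simp [hn, hst, hnegs, pvClose, pvE_stop words s i hi hst]
      · have hn' : pvNegAt words i = false := by simpa using hn
        by_cases hst : pvStopAt words i = true
        · have hp' : (if pvNegAt words i then some i
              else if pvStopAt words i || i = words.length - 1 then none else pending) = none := by
            simp [hn', hst]
          rw [hp', ih (i + 1) none (by omega)]
          cases pending with
          | none => simp [hn', hst, hnegs, pvClose]
          | some s => simp [hn', hst, hnegs, pvClose, pvE_stop words s i hi hst]
        · have hst' : pvStopAt words i = false := by simpa using hst
          by_cases hend : i = words.length - 1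
          · have hlen : i + 1 = words.length := by omega
            have hp' : (if pvNegAt words i then some i
                else if pvStopAt words i || i = words.length - 1 then none else pending) = none := by
              simp [hn', hst', decide_eq_true hend]
            rw [hp', ih (i + 1) none (by omega)]
            have hnil : pvNegsFrom words (i + 1) = [] := by
              unfold pvNegsFrom
              simp [show words.length - (i + 1) = 0 by omega]
            cases pending with
            | none => simp [hn', hst', hnegs, pvClose]
            | some s =>
              simp [pvClose, pvE_last words s i hlen hst', hn', hst', if_pos hend, hnegs]
          · have hp' : (if pvNegAt words i then some i
                else if pvStopAt words i || i = words.length - 1 then none else pending) = pending := by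
              simp [hn', hst', hend]
            rw [hp', ih (i + 1) pending (by omega)]
            cases pending with
            | none => simp [hn', hst', hend, hnegs, pvClose]
            | some s =>
              simp [hn', hst', hend, hnegs, pvClose,
                pvE_skip words s i (by omega) hst']
    · rw [pvS.eq_def]
      simp only [dif_neg hi]
      cases pending with
      | none => simp [pvClose, pvNegsFrom, show words.length - i = 0 by omega]
      | some s =>
        simp [pvClose, pvNegsFrom, pvE_off words s i (by omega),
          show words.length - i = 0 by omega]

-- A's loop equals pvS
theorem lemA (words : List String) :
    ∀ (l : List String) (i : Nat) (flag : Bool) (start : Nat) (res : List (Int × Int)),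
      l = words.drop i →
      negLoopA words words.length l i flag start res =
        res ++ pvS words i (if flag then some start else none) := by
  intro l
  induction l with
  | nil =>
    intro i flag start res hl
    have hi : ¬ i < words.length := by
      intro h
      have := congrArg List.length hl
      simp [List.length_drop] at this
      omega
    rw [pvS.eq_def]
    simp [negLoopA, hi]
  | cons w rest ih =>
    intro i flag start res hl
    have hi : i < words.length := by
      by_contra h
      rw [List.drop_eq_nil_of_le (by omega)] at hl
      exact List.cons_ne_nil _ _ hl
    have hw : words.getD i "" = w := by
      have h1 : words[i]? = some w := by
        have h := congrArg (fun l => l[0]?) hl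
        simpa [List.getElem?_drop] using h.symm
      simp [List.getD, h1]
    have hrest : rest = words.drop (i + 1) := by
      have : words.drop (i + 1) = (words.drop i).drop 1 := by
        rw [List.drop_drop]
      rw [this, ← hl]
      rfl
    have hstc : pvStopCond words i w = pvStopAt words i := by rw [pvStopAt, hw]
    have hnw : decide (w ∈ pvNegwords) = pvNegAt words i := by rw [pvNegAt, hw]
    rw [pvS.eq_def]
    simp only [dif_pos hi, negLoopA, hstc]
    by_cases hn : w ∈ pvNegwords
    · have hn' : pvNegAt words i = true := by rw [← hnw]; simpa using hn
      have hst : pvStopAt words i = true := pvNeg_stop words i hn'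
      rw [if_pos hn, ih (i + 1) true i _ hrest]
      cases flag with
      | false => simp [hn', hst]
      | true => simp [hn', hst]
    · have hn' : pvNegAt words i = false := by rw [← hnw]; simpa using hn
      rw [if_neg hn]
      cases flag with
      | false =>
        rw [ih (i + 1) _ _ _ hrest]
        simp [hn']
      | true =>
        by_cases hst : pvStopAt words i = true
        · rw [ih (i + 1) _ _ _ hrest]
          simp [hn', hst]
        · have hst' : pvStopAt words i = false := by simpa using hst
          by_cases hend : i = words.length - 1
          · have hdeT : decide (i = words.length - 1) = true := decide_eq_true hend
            rw [ih (i + 1) _ _ _ hrest]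
            simp [hn', hst', hdeT, if_pos hend]
          · have hdeF : decide (i = words.length - 1) = false := decide_eq_false hend
            rw [ih (i + 1) _ _ _ hrest]
            simp [hn', hst', hdeF, if_neg hend]

theorem pv_find?_congr {α : Type} (p q : α → Bool) (l : List α)
    (h : ∀ x ∈ l, p x = q x) : l.find? p = l.find? q := by
  induction l with
  | nil => rfl
  | cons a l ih =>
    have ha := h a (by simp)
    by_cases hp : p a = true
    · rw [List.find?_cons_of_pos hp, List.find?_cons_of_pos (ha ▸ hp)]
    · have hp' : p a = false := by simpa using hp
      rw [List.find?_cons_of_neg (by simp [hp']),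
        List.find?_cons_of_neg (by simp [← ha, hp']),
        ih (fun x hx => h x (by simp [hx]))]

theorem pv_isStop_getD (words : List String) (j : Nat) (hj : j < words.length) :
    (((List.range words.length).map (fun i => pvStopCond words i (words.getD i ""))).getD j false)
      = pvStopAt words j := by
  rw [List.getD_eq_getElem?_getD]
  simp [List.getElem?_map, List.getElem?_range, hj, pvStopAt]

theorem pv_flatMap_congr {α β : Type} {f g : α → List β} {l : List α}
    (h : ∀ a ∈ l, f a = g a) : l.flatMap f = l.flatMap g := by
  induction l with
  | nil => rfl
  | cons a l ih =>
    rw [List.flatMap_cons, List.flatMap_cons, h a (by simp),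
      ih (fun x hx => h x (by simp [hx]))]

-- B equals the anchor-based form
theorem lemB (words : List String) :
    negation_detection_alt words =
      (pvNegsFrom words 0).flatMap (fun s => pvE words s (s + 1)) := by
  unfold negation_detection_alt
  simp only []
  have hnegs : (List.range words.length).filter (fun i => decide (words.getD i "" ∈ pvNegwords))
      = pvNegsFrom words 0 := by
    unfold pvNegsFrom pvNegAt
    rw [List.range_eq_range']
    simp
  rw [hnegs]
  apply pv_flatMap_congr
  intro s hs
  have hslt : s < words.length := by
    unfold pvNegsFrom at hs
    have := List.mem_filter.1 hs
    have h2 := List.mem_range'_1.1 this.1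
    omega
  have hfind : (List.range' (s + 1) (words.length - (s + 1))).find?
        (fun j => ((List.range words.length).map (fun i => pvStopCond words i (words.getD i ""))).getD j false)
      = (List.range' (s + 1) (words.length - (s + 1))).find? (fun j => pvStopAt words j) := by
    apply pv_find?_congr
    intro j hj
    have hjr := List.mem_range'_1.1 hj
    exact pv_isStop_getD words j (by omega)
  rw [hfind]
  unfold pvE
  cases hf : (List.range' (s + 1) (words.length - (s + 1))).find? (fun j => pvStopAt words j) with
  | some j => rfl
  | none =>
    by_cases hlt : s < words.length - 1
    · simp [hlt, show s + 1 < words.length by omega]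
    · simp [hlt, show ¬ s + 1 < words.length by omega]

-- ===== VERDICT (by name: the statement is the Claim_ definition above) =====
theorem negation_detection_spec : Claim_equal_negation_detection := by
  intro words _ _
  unfold Spec_negation_detection
  rw [lemB words]
  unfold negation_detection
  rw [lemA words words 0 false 0 [] (by simp)]
  rw [show (if (false : Bool) = true then some 0 else none : Option Nat) = none from rfl]
  rw [lemS words words.length 0 none (by omega)]
  simp [pvClose]
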